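-- pv_equiv track=rewrite | github.com/arunabha003/BTP_IoT_security_with_Blockchain | accum/accumulator.py | batch_add_members
-- ===== SOURCE A (Python) =====
-- from typing import Iterable, Optional, Tuple, Set
--
-- def batch_add_members(A: int, primes: Iterable[int], N: int) -> int:
--     """
--     Efficiently add multiple members to the accumulator.
--
--     Uses iterative modular exponentiation to avoid huge intermediate exponents.
--
--     Args:
--         A: Current accumulator value
--         primes: Iterable of primes to add
--         N: RSA modulus
--
--     Returns:
--         int: New accumulator value after adding all primes
--     """
--     prime_list = list(primes)
--     if not prime_list:
--         return A
--
--     # Iteratively add each prime using modular exponentiation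
--     for p in prime_list:
--         if p <= 0:
--             raise ValueError("All primes must be positive")
--         # Note: Removed p >= N check as it's not mathematically necessary for exponents
--         A = pow(A, p, N)
--
--     return A
-- ===== SOURCE B (Python) =====
-- def _balanced_product(xs):
--     """Product of a non-empty list by balanced halving (subquadratic on big ints)."""
--     if len(xs) == 1:
--         return xs[0]
--     mid = len(xs) // 2
--     return _balanced_product(xs[:mid]) * _balanced_product(xs[mid:])
--
--
-- def batch_add_members(A: int, primes, N: int) -> int:
--     """Add members with one modular exponentiation of the balanced product of primes."""
--     prime_list = list(primes)
--     if not prime_list: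
--         return A
--     if any(p <= 0 for p in prime_list):
--         raise ValueError("All primes must be positive")
--     return pow(A, _balanced_product(prime_list), N)
-- ===== Notes on version B (the rewrite author's own statement) =====
-- stated objective: alternative
-- what changed: Instead of A's fold of one modular exponentiation per prime, B validates all primes in one pass, combines them with a balanced divide-and-conquer product, and returns a single pow(A, P, N) with the aggregated exponent.
import Mathlib
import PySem

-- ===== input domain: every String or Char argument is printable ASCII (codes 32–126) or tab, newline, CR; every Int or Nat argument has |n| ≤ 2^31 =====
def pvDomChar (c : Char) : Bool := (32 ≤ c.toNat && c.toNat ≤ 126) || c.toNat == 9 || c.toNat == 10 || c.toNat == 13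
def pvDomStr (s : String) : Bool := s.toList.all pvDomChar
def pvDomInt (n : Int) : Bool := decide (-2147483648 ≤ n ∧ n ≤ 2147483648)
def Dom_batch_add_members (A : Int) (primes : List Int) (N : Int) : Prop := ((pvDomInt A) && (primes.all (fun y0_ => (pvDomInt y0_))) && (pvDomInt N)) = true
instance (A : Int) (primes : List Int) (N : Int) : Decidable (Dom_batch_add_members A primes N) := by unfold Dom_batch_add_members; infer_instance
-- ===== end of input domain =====

-- B replaces A's per-prime fold of modular exponentiations by one validation pass,
-- a balanced divide-and-conquer product of the primes, and a single pow(A, P, N).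

-- ===== PORT A =====
-- Python's built-in pow(b, e, m) for A's port, computed by right-to-left binary
-- exponentiation so the port evaluates; proved equal to PySem.Int.powMod below.
def powModFast (b : Int) (e : Nat) (m : Int) : Int :=
  if e = 0 then PySem.Int.mod 1 m
  else
    let h := powModFast b (e / 2) m
    let h2 := PySem.Int.mod (h * h) m
    if e % 2 = 1 then PySem.Int.mod (h2 * b) m else h2

-- A: if the list is empty return A, else fold A := pow(A, p, N) over the primes.
def batch_add_members (A : Int) (primes : List Int) (N : Int) : Int :=
  if primes = [] then A
  else primes.foldl (fun acc p => powModFast acc p.toNat N) A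

-- ===== PORT B =====
-- B's _balanced_product: split at the midpoint and multiply the halves
-- ([] is unreachable in B; 1 keeps the Lean recursion total).
def balancedProduct (xs : List Int) : Int :=
  if _h : xs.length ≤ 1 then xs.headD 1
  else
    balancedProduct (xs.take (xs.length / 2)) * balancedProduct (xs.drop (xs.length / 2))
termination_by xs.length
decreasing_by
  · simp only [List.length_take]; omega
  · simp only [List.length_drop]; omega

-- Python's built-in pow(b, e, m) for B's port, computed left-to-right over the
-- binary digits of e (square, then multiply on a set bit); proved equal to
-- PySem.Int.powMod below.
def powModBits (b : Int) (e : Nat) (m : Int) : Int :=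
  (Nat.bits e).foldr
    (fun bit acc => PySem.Int.mod (acc * acc * (if bit then b else 1)) m)
    (PySem.Int.mod 1 m)

-- B: empty list returns A; otherwise one pow with the balanced product as exponent.
def batch_add_members_alt (A : Int) (primes : List Int) (N : Int) : Int :=
  if primes = [] then A
  else powModBits A (balancedProduct primes).toNat N

-- ===== PRECONDITION & SPEC =====
-- Pre_ excludes exactly the inputs where Python A raises ValueError:
-- some prime ≤ 0, or a nonempty list with modulus N = 0 (pow() 3rd argument cannot be 0).
def Pre_batch_add_members (A : Int) (primes : List Int) (N : Int) : Prop :=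
  (∀ p ∈ primes, 0 < p) ∧ (primes = [] ∨ N ≠ 0)
instance (A : Int) (primes : List Int) (N : Int) : Decidable (Pre_batch_add_members A primes N) := by unfold Pre_batch_add_members; infer_instance
def pvWitness_batch_add_members : Int × List Int × Int := (5, [3, 2], 7)
def Spec_batch_add_members (A : Int) (primes : List Int) (N : Int) (out : Int) : Prop := out = batch_add_members_alt A primes N
instance (A : Int) (primes : List Int) (N : Int) (out : Int) : Decidable (Spec_batch_add_members A primes N out) := by unfold Spec_batch_add_members; infer_instance

-- ===== CLAIM =====
def Claim_equal_batch_add_members : Prop := ∀ (A : Int) (primes : List Int) (N : Int), Dom_batch_add_members A primes N → Pre_batch_add_members A primes N → Spec_batch_add_members A primes N (batch_add_members A primes N)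

-- ===== LEMMAS AND PROOFS =====

-- (a^k) fmod n absorbs an inner fmod of the base.
theorem pow_fmod_base (a n : Int) (k : Nat) : ((a.fmod n) ^ k).fmod n = (a ^ k).fmod n := by
  induction k with
  | zero => simp
  | succ k ih =>
    rw [pow_succ, pow_succ, Int.mul_fmod, Int.fmod_fmod, ih, ← Int.mul_fmod]

-- A's binary exponentiation computes pow(b, e, m).
theorem powModFast_eq (b : Int) (e : Nat) (m : Int) :
    powModFast b e m = PySem.Int.powMod b e m := by
  induction e using Nat.strong_induction_on with
  | _ e ih =>
    rw [powModFast]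
    by_cases he : e = 0
    · simp [he, PySem.Int.powMod]
    · have ih2 := ih (e / 2) (Nat.div_lt_self (Nat.pos_of_ne_zero he) one_lt_two)
      simp only [if_neg he, ih2, PySem.Int.powMod, PySem.Int.mod]
      have hsq : ((b ^ (e / 2)).fmod m * (b ^ (e / 2)).fmod m).fmod m
          = (b ^ (e / 2 * 2)).fmod m := by
        rw [← Int.mul_fmod, ← pow_add]
        have h2 : e / 2 + e / 2 = e / 2 * 2 := by omega
        rw [h2]
      rcases Nat.even_or_odd e with hev | hod
      · have h0 : e % 2 = 0 := Nat.even_iff.mp hev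
        have hne : ¬ (e % 2 = 1) := by omega
        have hcanc : e / 2 * 2 = e := by omega
        rw [if_neg hne, hsq, hcanc]
      · have h1 : e % 2 = 1 := Nat.odd_iff.mp hod
        have hcanc : e / 2 * 2 + 1 = e := by omega
        rw [if_pos h1, hsq, Int.mul_fmod, Int.fmod_fmod, ← Int.mul_fmod, ← pow_succ, hcanc]

-- (x fmod m) * y fmod m = x * y fmod m (reduction of a factor).
theorem fmod_mul_left (x y m : Int) : (x.fmod m * y).fmod m = (x * y).fmod m := by
  rw [Int.mul_fmod, Int.fmod_fmod, ← Int.mul_fmod]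

-- B's left-to-right square-and-multiply computes pow(b, e, m).
theorem powModBits_eq (b : Int) (e : Nat) (m : Int) :
    powModBits b e m = PySem.Int.powMod b e m := by
  induction e using Nat.strong_induction_on with
  | _ e ih =>
    by_cases he : e = 0
    · simp [he, powModBits, PySem.Int.powMod]
    · have hlt : e / 2 < e := Nat.div_lt_self (Nat.pos_of_ne_zero he) one_lt_two
      have ih2 : powModBits b (e / 2) m = PySem.Int.powMod b (e / 2) m := ih _ hlt
      have hstep : ∀ bit, Nat.bits e = bit :: Nat.bits (e / 2) →
          powModBits b e m
            = PySem.Int.mod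
                (PySem.Int.powMod b (e / 2) m * PySem.Int.powMod b (e / 2) m
                  * (if bit then b else 1)) m := by
        intro bit hbit
        rw [powModBits, hbit, List.foldr_cons, ← powModBits, ih2]
      have hred : ∀ c : Int,
          ((b ^ (e / 2)).fmod m * (b ^ (e / 2)).fmod m * c).fmod m
            = (b ^ (e / 2) * b ^ (e / 2) * c).fmod m := by
        intro c
        rw [mul_assoc, fmod_mul_left,
          show b ^ (e / 2) * ((b ^ (e / 2)).fmod m * c)
              = (b ^ (e / 2)).fmod m * (b ^ (e / 2) * c) from by ring,
          fmod_mul_left, ← mul_assoc]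
      rcases Nat.even_or_odd e with hev | hod
      · obtain ⟨k, hk⟩ := hev
        have hkne : k ≠ 0 := by omega
        have hbits : Nat.bits e = false :: Nat.bits (e / 2) := by
          have h2 : e / 2 = k := by omega
          have hk2 : e = 2 * k := by omega
          rw [h2, hk2, Nat.bit0_bits _ hkne]
        rw [hstep false hbits]
        simp only [Bool.false_eq_true, if_false, PySem.Int.powMod, PySem.Int.mod]
        rw [hred 1, mul_one, ← pow_add]
        congr 2
        omega
      · obtain ⟨k, hk⟩ := hod
        have hbits : Nat.bits e = true :: Nat.bits (e / 2) := by
          have h2 : e / 2 = k := by omega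
          rw [h2, hk, Nat.bit1_bits]
        rw [hstep true hbits]
        simp only [if_true, PySem.Int.powMod, PySem.Int.mod]
        rw [hred b, ← pow_add, ← pow_succ]
        congr 2
        omega

-- The balanced product is the list product.
theorem balancedProduct_eq_prod (xs : List Int) : balancedProduct xs = xs.prod := by
  have H : ∀ (n : Nat) (l : List Int), l.length ≤ n → balancedProduct l = l.prod := by
    intro n
    induction n with
    | zero =>
      intro l hl
      have : l = [] := List.eq_nil_of_length_eq_zero (by omega)
      subst this
      rw [balancedProduct]
      simp
    | succ n ih =>
      intro l hl
      rw [balancedProduct]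
      by_cases h1 : l.length ≤ 1
      · rw [dif_pos h1]
        rcases l with _ | ⟨a, _ | ⟨b, t⟩⟩ <;> simp_all
      · rw [dif_neg h1,
          ih _ (by simp only [List.length_take]; omega),
          ih _ (by simp only [List.length_drop]; omega),
          List.prod_take_mul_prod_drop]
  exact H xs.length xs le_rfl

-- Applying powMod to an already-reduced value composes exponents.
theorem powMod_powMod (a : Int) (e k : Nat) (n : Int) :
    PySem.Int.powMod (PySem.Int.powMod a e n) k n = PySem.Int.powMod a (e * k) n := by
  simp only [PySem.Int.powMod, PySem.Int.mod]
  rw [pow_fmod_base, ← pow_mul]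

-- Loop invariant for A: folding powMod over ps starting from powMod a e n
-- equals one powMod with exponent e * (product of ps).
theorem fold_powMod (ps : List Int) (a : Int) (n : Int) (e : Nat) (hpos : ∀ p ∈ ps, 0 < p) :
    ps.foldl (fun acc p => PySem.Int.powMod acc p.toNat n) (PySem.Int.powMod a e n)
      = PySem.Int.powMod a (e * ps.prod.toNat) n := by
  induction ps generalizing e with
  | nil => simp
  | cons p t ih =>
    have hp : 0 < p := hpos p (List.mem_cons_self ..)
    have ht : ∀ q ∈ t, 0 < q := fun q hq => hpos q (List.mem_cons_of_mem _ hq)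
    have htprod : 0 < t.prod := List.prod_pos ht
    rw [List.foldl_cons, powMod_powMod, ih _ ht]
    congr 1
    rw [List.prod_cons, Int.toNat_mul hp.le htprod.le]
    ring

-- ===== VERDICT =====
theorem batch_add_members_spec : Claim_equal_batch_add_members := by
  intro A primes N _ hpre
  unfold Spec_batch_add_members batch_add_members batch_add_members_alt
  simp only [powModFast_eq, powModBits_eq, balancedProduct_eq_prod]
  rcases primes with _ | ⟨p, t⟩
  · simp
  · have hp : 0 < p := hpre.1 p (List.mem_cons_self ..)
    have ht : ∀ q ∈ t, 0 < q := fun q hq => hpre.1 q (List.mem_cons_of_mem _ hq)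
    simp only [if_neg (List.cons_ne_nil p t), List.foldl_cons]
    have hA : PySem.Int.powMod A p.toNat N
        = PySem.Int.powMod (PySem.Int.powMod A 1 N) p.toNat N := by
      rw [powMod_powMod, one_mul]
    rw [hA, fold_powMod t _ N p.toNat ht, powMod_powMod, one_mul]
    congr 1
    rw [List.prod_cons, Int.toNat_mul hp.le (List.prod_pos ht).le]
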